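-- pv_equiv track=rewrite | github.com/BurgosEnAbierto/actividades_civicos_burgos | src/scraper/utils/parse_pdf_content.py | split_cell_into_activities
-- ===== SOURCE A (Python) =====
-- def starts_new_activity(line):
--     l = line.strip()
--     if l.startswith("(*)"):
--         return True
--     if l.startswith("*)"):
--         return True
--     if l.startswith("(") and "*)" in l:
--         return True
--     # actividad sin (*)
--     # TODO
--     return False
--
-- def split_cell_into_activities(cell_text):
--     """
--     Divide una celda potencialmente con varias actividades en textos individuales.
--
--     Reglas:
--     - Una actividad nueva empieza cuando aparece:
--         * '(*' al inicio de línea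
--         * '*)' al inicio de línea
--         * '(' al inicio de línea y contiene '*)'
--     - Agrupa líneas hasta encontrar el inicio de la siguiente actividad.
--     """
--
--     # sustituir (\n*) por (*)
--     cell_text = cell_text.replace("(\n*)", "(*)", 1)
--
--     # normalización de saltos de línea
--     lines = [l.strip() for l in cell_text.split("\n") if l.strip()]
--     blocks = []
--     current = []
--
--     for line in lines:
--         if starts_new_activity(line) and current:
--             if line.startswith("*)"):
--                 line = line.replace("*)", "(*)", 1)
--             blocks.append(" ".join(current))
--             current = [line]
--         elif line != "(":
--             current.append(line)
--
--     if current: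
--         blocks.append(" ".join(current))
--
--     return blocks
-- ===== SOURCE B (Python) =====
-- def starts_new_activity(line):
--     l = line.strip()
--     if l.startswith("(*)"):
--         return True
--     if l.startswith("*)"):
--         return True
--     if l.startswith("(") and "*)" in l:
--         return True
--     return False
--
--
-- def _blocks(first, lines):
--     # take one block (head + following non-boundary lines), recurse on the rest
--     if not lines:
--         return []
--     head = lines[0]
--     if not first and head.startswith("*)"):
--         head = "(" + head
--     i = 1
--     while i < len(lines) and not starts_new_activity(lines[i]):
--         i += 1
--     return [" ".join([head] + lines[1:i])] + _blocks(False, lines[i:])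
--
--
-- def split_cell_into_activities(cell_text):
--     cell_text = cell_text.replace("(\n*)", "(*)", 1)
--     lines = [s for s in (l.strip() for l in cell_text.split("\n")) if s and s != "("]
--     return _blocks(True, lines)
-- ===== Notes on version B (the rewrite author's own statement) =====
-- stated objective: alternative
-- what changed: A's single pass with blocks/current accumulators and in-loop skipping of lone-parenthesis lines is replaced by an up-front filter of blank and lone-parenthesis lines followed by a recursive take-one-block (takeWhile/dropWhile span) split that normalises each block's marker head per block instead of inside the fold.
import Mathlib
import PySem

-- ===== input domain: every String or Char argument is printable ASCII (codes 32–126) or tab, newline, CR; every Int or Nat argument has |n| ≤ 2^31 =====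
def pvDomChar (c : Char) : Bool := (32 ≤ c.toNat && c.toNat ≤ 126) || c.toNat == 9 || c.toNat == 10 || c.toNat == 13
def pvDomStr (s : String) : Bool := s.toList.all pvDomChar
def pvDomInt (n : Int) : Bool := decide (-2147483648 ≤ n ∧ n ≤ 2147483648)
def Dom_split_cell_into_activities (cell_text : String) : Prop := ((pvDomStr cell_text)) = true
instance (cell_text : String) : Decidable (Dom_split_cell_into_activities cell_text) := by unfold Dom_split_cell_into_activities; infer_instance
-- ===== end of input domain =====

-- B replaces A's single-pass blocks/current accumulator fold by an up-front filter of empty/"(" lines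
-- followed by a recursive take-one-block-then-recurse split (alternative decomposition, same cost).


-- ===== PORT A =====
-- s.replace(old, new, 1): hand port (PySem.Str.replace has no count parameter); exact for the
-- nonempty patterns both programs use: replace the FIRST occurrence of old, if any.
def charsReplaceOnce (cs old new : List Char) : List Char :=
  let i := PySem.Chars.find cs old
  if i = -1 then cs else cs.take i.toNat ++ new ++ cs.drop (i.toNat + old.length)

def replaceOnce (s old new : String) : String :=
  String.ofList (charsReplaceOnce s.toList old.toList new.toList)

def starts_new_activity (line : String) : Bool :=
  let l := PySem.Str.strip line
  if PySem.Str.startswith l "(*)" then true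
  else if PySem.Str.startswith l "*)" then true
  else if PySem.Str.startswith l "(" && PySem.Str.isIn "*)" l then true
  else false

-- lines = [l.strip() for l in cell_text.split("\n") if l.strip()]
-- ("\n" ≠ "", so split? is always `some`; getD [] only discharges the Option)
def pyLinesOf (t : String) : List String :=
  (((PySem.Str.split? t "\n").getD []).map PySem.Str.strip).filter (fun l => !(l == ""))

def stepA (s : List String × List String) (line : String) : List String × List String :=
  if starts_new_activity line && !s.2.isEmpty then
    let line' := if PySem.Str.startswith line "*)" then replaceOnce line "*)" "(*)" else line
    (s.1 ++ [PySem.Str.join " " s.2], [line'])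
  else if line ≠ "(" then (s.1, s.2 ++ [line])
  else s

def split_cell_into_activities (cell_text : String) : List String :=
  let r := (pyLinesOf (replaceOnce cell_text "(\n*)" "(*)")).foldl stepA ([], [])
  if r.2.isEmpty then r.1 else r.1 ++ [PySem.Str.join " " r.2]

-- ===== PORT B =====
def fixHead (first : Bool) (h : String) : String :=
  if !first && PySem.Str.startswith h "*)" then "(" ++ h else h

def altBlocks (first : Bool) : List String → List String
  | [] => []
  | h :: t =>
    PySem.Str.join " " (fixHead first h :: t.takeWhile (fun l => !starts_new_activity l)) ::
      altBlocks false (t.dropWhile (fun l => !starts_new_activity l))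
termination_by ls => ls.length
decreasing_by
  exact Nat.lt_succ_of_le (List.length_dropWhile_le _ _)

def split_cell_into_activities_alt (cell_text : String) : List String :=
  altBlocks true
    ((pyLinesOf (replaceOnce cell_text "(\n*)" "(*)")).filter (fun l => !(l == "(")))

-- ===== PRECONDITION & SPEC =====
def Spec_split_cell_into_activities (cell_text : String) (out : List String) : Prop := out = split_cell_into_activities_alt cell_text
instance (cell_text : String) (out : List String) : Decidable (Spec_split_cell_into_activities cell_text out) := by unfold Spec_split_cell_into_activities; infer_instance

-- ===== CLAIM (what is proved, stated in full; the proofs are below) =====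
def Claim_equal_split_cell_into_activities : Prop := ∀ (cell_text : String), Dom_split_cell_into_activities cell_text → Spec_split_cell_into_activities cell_text (split_cell_into_activities cell_text)

-- ===== LEMMAS AND PROOFS =====

def finishA (r : List String × List String) : List String :=
  if r.2.isEmpty then r.1 else r.1 ++ [PySem.Str.join " " r.2]

theorem stepA_paren (s : List String × List String) : stepA s "(" = s := by
  have h : starts_new_activity "(" = false := by decide
  simp [stepA, h]

theorem foldl_stepA_filter (L : List String) (s : List String × List String) :
    L.foldl stepA s = (L.filter (fun l => !(l == "("))).foldl stepA s := by
  induction L generalizing s with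
  | nil => rfl
  | cons l t ih =>
    by_cases h : l = "("
    · subst h; simpa [stepA_paren] using ih s
    · simp [h, List.foldl_cons, ih]

theorem fix_eq (l : String) (h : PySem.Str.startswith l "*)" = true) :
    replaceOnce l "*)" "(*)" = "(" ++ l := by
  have hsw : PySem.Chars.startswith l.toList "*)".toList = true := by
    rw [← PySem.Str.startswith_eq]; exact h
  obtain ⟨rest, hrest⟩ := (PySem.Chars.startswith_iff _ _).mp hsw
  have hfind : PySem.Chars.find l.toList "*)".toList = 0 := by
    have hinf : "*)".toList <:+: l.toList := ⟨[], rest, by simpa using hrest⟩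
    have hne : PySem.Chars.find l.toList "*)".toList ≠ -1 :=
      (PySem.Chars.find_ne_neg_one_iff _ _).mpr hinf
    have hge : 0 ≤ PySem.Chars.find l.toList "*)".toList := by
      have := PySem.Chars.neg_one_le_find l.toList "*)".toList
      omega
    have hspec := PySem.Chars.find_spec (s := l.toList) (sub := "*)".toList) hge
    by_contra hne0
    have hpos : 0 < (PySem.Chars.find l.toList "*)".toList).toNat := by omega
    exact hspec.2 0 hpos (by simpa using ⟨rest, hrest⟩)
  apply String.toList_inj.mp
  rw [String.toList_append]
  have : (replaceOnce l "*)" "(*)").toList =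
      charsReplaceOnce l.toList "*)".toList "(*)".toList := by simp [replaceOnce]
  rw [this]
  simp only [charsReplaceOnce, hfind]
  rw [← hrest]
  simp

theorem stepA_blocks_shift (ls : List String) (b c : List String) :
    ls.foldl stepA (b, c) =
      (b ++ (ls.foldl stepA ([], c)).1, (ls.foldl stepA ([], c)).2) := by
  induction ls generalizing b c with
  | nil => simp
  | cons l t ih =>
    simp only [List.foldl_cons]
    have key : ∃ β γ, stepA (b, c) l = (b ++ β, γ) ∧ stepA ([], c) l = (β, γ) := by
      by_cases h1 : (starts_new_activity l && !c.isEmpty) = true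
      · exact ⟨[PySem.Str.join " " c],
          [if PySem.Str.startswith l "*)" = true then replaceOnce l "*)" "(*)" else l],
          by simp [stepA, h1], by simp [stepA, h1]⟩
      · by_cases h2 : l = "("
        · exact ⟨[], c, by simp [h2, stepA_paren], by simp [h2, stepA_paren]⟩
        · exact ⟨[], c ++ [l], by simp [stepA, h1, h2], by simp [stepA, h1, h2]⟩
    obtain ⟨β, γ, e1, e2⟩ := key
    rw [e1, e2, ih (b ++ β) γ, ih β γ]
    simp

theorem finishA_shift (ls : List String) (b c : List String) :
    finishA (ls.foldl stepA (b, c)) = b ++ finishA (ls.foldl stepA ([], c)) := by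
  rw [stepA_blocks_shift]
  unfold finishA
  split_ifs <;> simp_all

theorem fixline_eq (l : String) :
    (if PySem.Str.startswith l "*)" then replaceOnce l "*)" "(*)" else l) = fixHead false l := by
  unfold fixHead
  simp only [Bool.not_false, Bool.true_and]
  by_cases hsw : PySem.Str.startswith l "*)" = true
  · rw [if_pos hsw, if_pos hsw, fix_eq l hsw]
  · rw [if_neg hsw, if_neg hsw]

theorem main_lemma (ls : List String) (c : List String) (hc : c ≠ [])
    (hno : ∀ l ∈ ls, l ≠ "(") :
    finishA (ls.foldl stepA ([], c)) =
      PySem.Str.join " " (c ++ ls.takeWhile (fun l => !starts_new_activity l)) ::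
        altBlocks false (ls.dropWhile (fun l => !starts_new_activity l)) := by
  induction ls generalizing c with
  | nil => simp [finishA, hc, altBlocks]
  | cons l t ih =>
    have hl : l ≠ "(" := hno l (by simp)
    have hno' : ∀ x ∈ t, x ≠ "(" := fun x hx => hno x (by simp [hx])
    rw [List.takeWhile_cons, List.dropWhile_cons]
    by_cases hs : starts_new_activity l = true
    · have hns : (!starts_new_activity l) = false := by rw [hs]; rfl
      have e : stepA ([], c) l =
          ([PySem.Str.join " " c],
            [if PySem.Str.startswith l "*)" = true then replaceOnce l "*)" "(*)" else l]) := by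
        simp [stepA, hs, hc]
      rw [List.foldl_cons, e, finishA_shift,
        ih [if PySem.Str.startswith l "*)" = true then replaceOnce l "*)" "(*)" else l]
          (by simp) hno', hns]
      simp only [Bool.false_eq_true, if_false, List.append_nil]
      conv_rhs => rw [altBlocks]
      rw [← fixline_eq l]
      simp only [List.singleton_append]
    · have hs' : starts_new_activity l = false := by simpa using hs
      have hns : (!starts_new_activity l) = true := by rw [hs']; rfl
      have e : stepA ([], c) l = ([], c ++ [l]) := by simp [stepA, hs', hl]
      rw [List.foldl_cons, e, ih (c ++ [l]) (by simp) hno', hns]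
      simp

-- ===== VERDICT (by name: the statement is the Claim_ definition above) =====
theorem split_cell_into_activities_spec : Claim_equal_split_cell_into_activities := by
  intro cell_text _
  unfold Spec_split_cell_into_activities split_cell_into_activities split_cell_into_activities_alt
  show finishA _ = _
  rw [foldl_stepA_filter]
  set F := (pyLinesOf (replaceOnce cell_text "(\n*)" "(*)")).filter (fun l => !(l == "(")) with hF
  have hno : ∀ l ∈ F, l ≠ "(" := by
    intro l hl
    have := List.of_mem_filter hl
    simpa using this
  match hFe : F with
  | [] => simp [altBlocks, finishA]
  | l0 :: rest =>
    have hl0 : l0 ≠ "(" := hno l0 (by simp)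
    have hno' : ∀ x ∈ rest, x ≠ "(" := fun x hx => hno x (by simp [hx])
    have hstep0 : stepA ([], []) l0 = ([], [l0]) := by
      simp [stepA, hl0]
    rw [List.foldl_cons, hstep0, main_lemma rest [l0] (by simp) hno']
    simp [altBlocks, fixHead]
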